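-- pv_equiv track=rewrite | github.com/dodona-edu/pass-fail-article | extractors.py | get_eval_results_binned
-- ===== SOURCE A (Python) =====
-- def get_eval_results_binned(data):
--     results = []
--     for student in data:
--         st_eval = []
--         marks = student["marks"]
--         st_eval.append([2] if ("ev1" in marks and marks["ev1"] and marks["ev1"] >= 12) else
--                        [1] if ("ev1" in marks and marks["ev1"] and marks["ev1"] >= 8) else [0])
--         st_eval.append([2] if ("ev2" in marks and marks["ev2"] and marks["ev2"] >= 12) else
--                        [1] if ("ev2" in marks and marks["ev2"] and marks["ev2"] >= 8) else [0])
--         results.append(st_eval)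
--     return results
-- ===== SOURCE B (Python) =====
-- THRESHOLDS = (8, 12)
-- KEYS = ("ev1", "ev2")
--
-- def get_eval_results_binned(data):
--     results = []
--     for student in data:
--         marks = student["marks"]
--         results.append([[sum(1 for t in THRESHOLDS if (marks.get(k) or 0) >= t)]
--                         for k in KEYS])
--     return results
-- ===== Notes on version B (the rewrite author's own statement) =====
-- stated objective: idiomatic
-- what changed: Replaces A's duplicated per-key if/elif branch ladder by a threshold table (8, 12) looped over the two keys, computing each level as the count of thresholds reached by `marks.get(k) or 0`.
import Mathlib
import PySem

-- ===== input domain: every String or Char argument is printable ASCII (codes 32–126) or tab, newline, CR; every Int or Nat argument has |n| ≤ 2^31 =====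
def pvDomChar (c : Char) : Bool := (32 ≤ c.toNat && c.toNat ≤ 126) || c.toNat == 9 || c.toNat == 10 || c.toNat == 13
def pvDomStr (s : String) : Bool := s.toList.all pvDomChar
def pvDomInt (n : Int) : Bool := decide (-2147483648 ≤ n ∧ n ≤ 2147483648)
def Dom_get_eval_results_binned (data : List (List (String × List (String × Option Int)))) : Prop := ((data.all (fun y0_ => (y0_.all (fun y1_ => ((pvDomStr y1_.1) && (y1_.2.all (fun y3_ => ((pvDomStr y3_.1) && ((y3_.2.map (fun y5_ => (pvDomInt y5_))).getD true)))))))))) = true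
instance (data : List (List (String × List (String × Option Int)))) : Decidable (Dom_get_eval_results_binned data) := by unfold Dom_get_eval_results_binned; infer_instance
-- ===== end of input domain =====

-- B replaces A's duplicated per-key if/elif branch ladder by a threshold table looped over the two keys (idiomatic; same cost).


-- ===== PORT A =====
-- "k in marks and marks[k] and marks[k] >= t" (first-match dict lookup; None and 0 are falsy)
def pvCondA (marks : List (String × Option Int)) (k : String) (t : Int) : Bool :=
  match marks.lookup k with
  | some (some v) => v != 0 && decide (v ≥ t)
  | _ => false

def get_eval_results_binned (data : List (List (String × List (String × Option Int)))) : List (List (List Int)) :=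
  data.foldl (fun results student =>
    let marks := (student.lookup "marks").getD []   -- student["marks"]; KeyError excluded by Pre_
    let st_eval : List (List Int) := []
    let st_eval := st_eval ++ [if pvCondA marks "ev1" 12 then [(2 : Int)] else if pvCondA marks "ev1" 8 then [1] else [0]]
    let st_eval := st_eval ++ [if pvCondA marks "ev2" 12 then [(2 : Int)] else if pvCondA marks "ev2" 8 then [1] else [0]]
    results ++ [st_eval]) []

-- ===== PORT B =====
-- level = number of thresholds reached by `marks.get(k) or 0`
def pvBinB (marks : List (String × Option Int)) (k : String) : List Int :=
  let val : Int := ((marks.lookup k).getD none).getD 0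
  [(([8, 12] : List Int).countP (fun t => decide (val ≥ t)) : Int)]

def get_eval_results_binned_alt (data : List (List (String × List (String × Option Int)))) : List (List (List Int)) :=
  data.map (fun student =>
    let marks := (student.lookup "marks").getD []   -- student["marks"]; KeyError excluded by Pre_
    (["ev1", "ev2"] : List String).map (fun k => pvBinB marks k))

-- ===== PRECONDITION & SPEC =====
-- Pre_ excludes exactly the inputs where a student dict lacks the key "marks", on which Python A raises KeyError.
def Pre_get_eval_results_binned (data : List (List (String × List (String × Option Int)))) : Prop :=
  (data.all (fun student => (student.lookup "marks").isSome)) = true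
instance (data : List (List (String × List (String × Option Int)))) : Decidable (Pre_get_eval_results_binned data) := by unfold Pre_get_eval_results_binned; infer_instance
def pvWitness_get_eval_results_binned : (List (List (String × List (String × Option Int)))) :=
  [[("marks", [("ev1", some 9), ("ev2", some 13)])], [("marks", [("ev2", none)])]]

def Spec_get_eval_results_binned (data : List (List (String × List (String × Option Int)))) (out : List (List (List Int))) : Prop := out = get_eval_results_binned_alt data
instance (data : List (List (String × List (String × Option Int)))) (out : List (List (List Int))) : Decidable (Spec_get_eval_results_binned data out) := by unfold Spec_get_eval_results_binned; infer_instance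

-- ===== CLAIM (what is proved, stated in full; the proofs are below) =====
def Claim_equal_get_eval_results_binned : Prop := ∀ (data : List (List (String × List (String × Option Int)))), Dom_get_eval_results_binned data → Pre_get_eval_results_binned data → Spec_get_eval_results_binned data (get_eval_results_binned data)

-- ===== LEMMAS AND PROOFS =====

-- A's per-key branch ladder equals B's threshold count, for every lookup result.
theorem pv_bin_eq (marks : List (String × Option Int)) (k : String) :
    (if pvCondA marks k 12 then [(2 : Int)] else if pvCondA marks k 8 then [1] else [0]) = pvBinB marks k := by
  unfold pvCondA pvBinB
  cases h : marks.lookup k with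
  | none => simp [List.countP]
  | some o =>
    cases o with
    | none => simp [List.countP]
    | some v =>
      by_cases h12 : (12 : Int) ≤ v
      · have h8 : (8 : Int) ≤ v := by omega
        have hv : v ≠ 0 := by omega
        simp [List.countP, List.countP.go, hv, ge_iff_le, h8, h12]
      · by_cases h8 : (8 : Int) ≤ v
        · have hv : v ≠ 0 := by omega
          simp [List.countP, List.countP.go, hv, ge_iff_le, h8, h12]
        · by_cases hv : v = 0
          · simp [List.countP, List.countP.go, hv]
          · simp [List.countP, List.countP.go, h8, h12, ge_iff_le]

-- The accumulator-generalised main loop equation: A's foldl over any prefix equals that prefix ++ B's map.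
theorem pv_main (data : List (List (String × List (String × Option Int)))) (acc : List (List (List Int))) :
    data.foldl (fun results student =>
      let marks := (student.lookup "marks").getD []
      let st_eval : List (List Int) := []
      let st_eval := st_eval ++ [if pvCondA marks "ev1" 12 then [(2 : Int)] else if pvCondA marks "ev1" 8 then [1] else [0]]
      let st_eval := st_eval ++ [if pvCondA marks "ev2" 12 then [(2 : Int)] else if pvCondA marks "ev2" 8 then [1] else [0]]
      results ++ [st_eval]) acc
    = acc ++ data.map (fun student =>
        let marks := (student.lookup "marks").getD []
        (["ev1", "ev2"] : List String).map (fun k => pvBinB marks k)) := by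
  induction data generalizing acc with
  | nil => simp
  | cons x xs ih =>
    rw [List.foldl_cons, ih]
    simp [pv_bin_eq]

-- ===== VERDICT (by name: the statement is the Claim_ definition above) =====
theorem get_eval_results_binned_spec : Claim_equal_get_eval_results_binned := by
  intro data _ _
  unfold Spec_get_eval_results_binned get_eval_results_binned get_eval_results_binned_alt
  simpa using pv_main data []
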